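-- pv_equiv track=rewrite | github.com/ShuklaGroup/esmdynamic | esm/esmdynamic/predict.py | get_crop_mask_and_chain_info
-- ===== SOURCE A (Python) =====
-- def get_crop_mask_and_chain_info(sequence, insert_len=25, chain_ids=None):
--     """
--     Builds crop mask, residue labels with chain IDs, and boundary lines.
--     """
--     if chain_ids is None:
--         chain_ids = "ABCDEFGHIJKLMNOPQRSTUVWXYZ"
--     chain_idx = 0
--     mask = []
--     labels = []
--     boundaries = []
--     res_counter = 1
--
--     for res in sequence:
--         if res == ":":
--             chain_idx += 1
--             res_counter = 1
--             boundaries.append(len(mask))  # position after crop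
--             mask.extend([False] * insert_len)
--         else:
--             mask.append(True)
--             chain_id = chain_ids[chain_idx % len(chain_ids)]
--             labels.append(f"{chain_id}-{res}{res_counter}")
--             res_counter += 1
--
--     return mask, labels, boundaries
-- ===== SOURCE B (Python) =====
-- def get_crop_mask_and_chain_info(sequence, insert_len=25, chain_ids=None):
--     """
--     Builds crop mask, residue labels with chain IDs, and boundary lines.
--     Split-then-nested-loop decomposition: chains are obtained up front with
--     split(':'), each chain is labelled with its own fresh residue counter.
--     """
--     if chain_ids is None:
--         chain_ids = "ABCDEFGHIJKLMNOPQRSTUVWXYZ"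
--     mask = []
--     labels = []
--     boundaries = []
--     chains = sequence.split(":")
--     for i, chain in enumerate(chains):
--         if i > 0:
--             boundaries.append(len(mask))
--             mask.extend([False] * insert_len)
--         res_counter = 1
--         for res in chain:
--             mask.append(True)
--             labels.append(f"{chain_ids[i % len(chain_ids)]}-{res}{res_counter}")
--             res_counter += 1
--     return mask, labels, boundaries
-- ===== Notes on version B (the rewrite author's own statement) =====
-- stated objective: alternative
-- what changed: A's single flat pass over the characters with colon-branching and mutable chain_idx/res_counter state is replaced by splitting the sequence on ':' up front and running a nested loop over the chains, each chain with its own fresh residue counter and the boundary/crop insertion emitted between chains.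
import Mathlib
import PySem

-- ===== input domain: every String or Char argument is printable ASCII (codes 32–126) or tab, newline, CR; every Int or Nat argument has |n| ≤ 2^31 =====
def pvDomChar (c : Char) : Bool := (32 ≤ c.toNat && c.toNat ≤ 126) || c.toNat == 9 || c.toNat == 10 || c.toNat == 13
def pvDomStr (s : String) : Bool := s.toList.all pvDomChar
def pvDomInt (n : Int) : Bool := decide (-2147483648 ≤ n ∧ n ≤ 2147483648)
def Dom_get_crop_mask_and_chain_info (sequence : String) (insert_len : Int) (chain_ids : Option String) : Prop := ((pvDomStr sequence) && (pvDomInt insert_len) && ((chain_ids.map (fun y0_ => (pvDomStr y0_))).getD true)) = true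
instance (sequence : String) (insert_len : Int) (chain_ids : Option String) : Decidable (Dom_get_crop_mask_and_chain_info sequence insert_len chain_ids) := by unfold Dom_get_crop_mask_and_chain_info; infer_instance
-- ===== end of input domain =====

-- B replaces A's flat colon-branching character pass by split(':') followed by a nested loop
-- over chains (alternative decomposition, same cost); equivalence is about the return value.

-- ===== PORT A =====
-- f"{chain_ids[chain_idx % len(chain_ids)]}-{res}{res_counter}"; the pyGetD default ' ' is only
-- reached when len(chain_ids) = 0, where Python raises ZeroDivisionError (excluded by Pre_).
def pvLabel (cid : List Char) (ci : Int) (res : Char) (rc : Int) : String :=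
  String.ofList (PySem.List.pyGetD cid (PySem.Int.mod ci ((cid.length : Int))) ' ' :: '-' :: res :: PySem.Int.toChars rc)

-- one iteration of A's `for res in sequence` over state (chain_idx, mask, labels, boundaries, res_counter);
-- [False]*insert_len = List.replicate insert_len.toNat false (exact: a non-positive count gives []).
def pvAStep (il : Int) (cid : List Char) (st : Int × List Bool × List String × List Int × Int) (res : Char) :
    Int × List Bool × List String × List Int × Int :=
  match st with
  | (ci, mask, labels, bnd, rc) =>
    if res = ':' then
      (ci + 1, mask ++ List.replicate il.toNat false, labels, bnd ++ [(mask.length : Int)], 1)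
    else
      (ci, mask ++ [true], labels ++ [pvLabel cid ci res rc], bnd, rc + 1)

def get_crop_mask_and_chain_info (sequence : String) (insert_len : Int) (chain_ids : Option String) : List Bool × List String × List Int :=
  let cid := (chain_ids.getD "ABCDEFGHIJKLMNOPQRSTUVWXYZ").toList
  let s := sequence.toList.foldl (pvAStep insert_len cid) (0, [], [], [], 1)
  (s.2.1, s.2.2.1, s.2.2.2.1)

-- ===== PORT B =====
-- one iteration of B's inner `for res in chain` over (mask, labels, res_counter)
def pvBInner (cid : List Char) (i : Int) (st : List Bool × List String × Int) (res : Char) :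
    List Bool × List String × Int :=
  match st with
  | (mask, labels, rc) => (mask ++ [true], labels ++ [pvLabel cid i res rc], rc + 1)

-- one iteration of B's outer `for i, chain in enumerate(chains)`
def pvBStep (il : Int) (cid : List Char) (st : List Bool × List String × List Int) (p : Int × List Char) :
    List Bool × List String × List Int :=
  match st with
  | (mask, labels, bnd) =>
    let mb := if p.1 > 0 then (mask ++ List.replicate il.toNat false, bnd ++ [(mask.length : Int)]) else (mask, bnd)
    let r := p.2.foldl (pvBInner cid p.1) (mb.1, labels, (1 : Int))
    (r.1, r.2.1, mb.2)

def get_crop_mask_and_chain_info_alt (sequence : String) (insert_len : Int) (chain_ids : Option String) : List Bool × List String × List Int :=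
  let cid := (chain_ids.getD "ABCDEFGHIJKLMNOPQRSTUVWXYZ").toList
  let chains := PySem.Chars.splitOn sequence.toList [':']
  (PySem.List.enumerate chains).foldl (pvBStep insert_len cid) ([], [], [])

-- ===== PRECONDITION & SPEC =====
-- Pre_ excludes exactly the inputs where Python A raises ZeroDivisionError: an empty chain_ids
-- string while sequence contains a non-colon residue (B raises there too).
def Pre_get_crop_mask_and_chain_info (sequence : String) (insert_len : Int) (chain_ids : Option String) : Prop :=
  chain_ids = some "" → sequence.toList.all (fun c => c == ':') = true
instance (sequence : String) (insert_len : Int) (chain_ids : Option String) : Decidable (Pre_get_crop_mask_and_chain_info sequence insert_len chain_ids) := by unfold Pre_get_crop_mask_and_chain_info; infer_instance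

def pvWitness_get_crop_mask_and_chain_info : String × Int × Option String := ("AC:DE", 2, none)

def Spec_get_crop_mask_and_chain_info (sequence : String) (insert_len : Int) (chain_ids : Option String) (out : List Bool × List String × List Int) : Prop := out = get_crop_mask_and_chain_info_alt sequence insert_len chain_ids
instance (sequence : String) (insert_len : Int) (chain_ids : Option String) (out : List Bool × List String × List Int) : Decidable (Spec_get_crop_mask_and_chain_info sequence insert_len chain_ids out) := by unfold Spec_get_crop_mask_and_chain_info; infer_instance

-- ===== CLAIM (what is proved, stated in full; the proofs are below) =====
def Claim_equal_get_crop_mask_and_chain_info : Prop := ∀ (sequence : String) (insert_len : Int) (chain_ids : Option String), Dom_get_crop_mask_and_chain_info sequence insert_len chain_ids → Pre_get_crop_mask_and_chain_info sequence insert_len chain_ids → Spec_get_crop_mask_and_chain_info sequence insert_len chain_ids (get_crop_mask_and_chain_info sequence insert_len chain_ids)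

-- ===== LEMMAS AND PROOFS =====

-- reference form of Python's s.split(":"): structural recursion on the characters
def pvSplc : List Char → List (List Char)
  | [] => [[]]
  | c :: r =>
    if c = ':' then [] :: pvSplc r
    else
      match pvSplc r with
      | [] => [[c]]
      | h :: t => (c :: h) :: t

theorem pvSplc_ne_nil (cs : List Char) : pvSplc cs ≠ [] := by
  cases cs with
  | nil => simp [pvSplc]
  | cons c r =>
    simp only [pvSplc]
    split
    · simp
    · cases pvSplc r <;> simp

def pvConsHead (pre : List Char) : List (List Char) → List (List Char)
  | [] => [pre]
  | h :: t => (pre ++ h) :: t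

theorem pvGo_eq (fuel : Nat) : ∀ (l cur : List Char) (acc : List (List Char)), l.length < fuel →
    PySem.Chars.splitOn.go [':'] fuel l cur acc = acc.reverse ++ pvConsHead cur.reverse (pvSplc l) := by
  induction fuel with
  | zero => intro l cur acc h; omega
  | succ fuel ih =>
    intro l cur acc h
    cases l with
    | nil => simp [PySem.Chars.splitOn.go, pvSplc, pvConsHead]
    | cons c rest =>
      by_cases hc : c = ':'
      · subst hc
        have hpre : [':'].isPrefixOf (':' :: rest) = true := by simp [List.isPrefixOf]
        rw [PySem.Chars.splitOn.go]
        simp only [hpre, if_pos]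
        rw [ih _ _ _ (by simpa using Nat.lt_of_succ_lt_succ h)]
        simp only [pvSplc]
        cases hs : pvSplc rest with
        | nil => exact absurd hs (pvSplc_ne_nil rest)
        | cons h' t' => simp [pvConsHead, hs]
      · have hpre : [':'].isPrefixOf (c :: rest) = false := by
          simp only [List.isPrefixOf, Bool.and_true, beq_eq_false_iff_ne, ne_eq]
          exact fun e => hc e.symm
        rw [PySem.Chars.splitOn.go]
        simp only [hpre, Bool.false_eq_true, if_neg, not_false_iff]
        rw [ih _ _ _ (by simpa using Nat.lt_of_succ_lt_succ h)]
        simp only [pvSplc, if_neg hc]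
        cases hs : pvSplc rest with
        | nil => exact absurd hs (pvSplc_ne_nil rest)
        | cons h' t' => simp [pvConsHead, List.reverse_cons]

theorem pvSplitOn_eq (cs : List Char) : PySem.Chars.splitOn cs [':'] = pvSplc cs := by
  rw [PySem.Chars.splitOn, pvGo_eq _ _ _ _ (by omega)]
  cases hs : pvSplc cs with
  | nil => exact absurd hs (pvSplc_ne_nil cs)
  | cons h t => simp [pvConsHead]

-- B's tail fold and head-chunk run, used to state the loop invariant
def pvRunB (il : Int) (cid : List Char) (chains : List (List Char)) (start : Int)
    (st : List Bool × List String × List Int) : List Bool × List String × List Int :=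
  (PySem.List.enumerate chains start).foldl (pvBStep il cid) st

def pvHeadRun (cid : List Char) (ci rc : Int) (h : List Char) (m : List Bool) (lb : List String)
    (bd : List Int) : List Bool × List String × List Int :=
  let r := h.foldl (pvBInner cid ci) (m, lb, rc)
  (r.1, r.2.1, bd)

theorem pvMain (il : Int) (cid : List Char) :
    ∀ (cs : List Char) (ci rc : Int) (m : List Bool) (lb : List String) (bd : List Int), 0 ≤ ci →
    (((cs.foldl (pvAStep il cid) (ci, m, lb, bd, rc)).2.1,
      (cs.foldl (pvAStep il cid) (ci, m, lb, bd, rc)).2.2.1,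
      (cs.foldl (pvAStep il cid) (ci, m, lb, bd, rc)).2.2.2.1) : List Bool × List String × List Int)
    = pvRunB il cid (pvSplc cs).tail (ci + 1) (pvHeadRun cid ci rc (pvSplc cs).headI m lb bd) := by
  intro cs
  induction cs with
  | nil =>
    intro ci rc m lb bd _
    simp [pvSplc, pvRunB, pvHeadRun]
  | cons c rest ih =>
    intro ci rc m lb bd hci
    by_cases hc : c = ':'
    · subst hc
      simp only [List.foldl_cons, pvAStep, if_true]
      rw [ih (ci + 1) 1 (m ++ List.replicate il.toNat false) lb (bd ++ [(m.length : Int)]) (by omega)]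
      simp only [pvSplc, reduceIte, List.tail_cons, List.headI]
      cases hs : pvSplc rest with
      | nil => exact absurd hs (pvSplc_ne_nil rest)
      | cons h' t' =>
        have hgt : (ci + 1) > 0 := by omega
        simp [pvRunB, PySem.List.enumerate, pvBStep, pvHeadRun, hgt]
    · simp only [List.foldl_cons, pvAStep, if_neg hc]
      rw [ih ci (rc + 1) (m ++ [true]) (lb ++ [pvLabel cid ci c rc]) bd hci]
      simp only [pvSplc, if_neg hc]
      cases hs : pvSplc rest with
      | nil => exact absurd hs (pvSplc_ne_nil rest)
      | cons h' t' => simp [pvHeadRun, pvBInner]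

-- ===== VERDICT (by name: the statement is the Claim_ definition above) =====
theorem get_crop_mask_and_chain_info_spec : Claim_equal_get_crop_mask_and_chain_info := by
  intro sequence insert_len chain_ids _ _
  unfold Spec_get_crop_mask_and_chain_info
  simp only [get_crop_mask_and_chain_info, get_crop_mask_and_chain_info_alt]
  rw [pvSplitOn_eq]
  rw [pvMain insert_len _ sequence.toList 0 1 [] [] [] (by omega)]
  cases hs : pvSplc sequence.toList with
  | nil => exact absurd hs (pvSplc_ne_nil _)
  | cons h t =>
    simp [pvRunB, PySem.List.enumerate, pvBStep, pvHeadRun]
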